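-- pv_equiv track=rewrite | github.com/chuckclift/tf2_dashboard | log_parsing.py | latest_game_lines
-- ===== SOURCE A (Python) =====
-- from typing import List, Dict, Tuple, Set, NamedTuple, Optional
--
-- def latest_game_lines(lines: List[str], user: str) -> List[str]:
--     """
--     gets the game lines for the most recent or currently running game.
--     """
--     game_lines: List[str] = []
--     for l in lines:
--         if f"{user} connected" == l.strip():
--             game_lines = [l]
--         else:
--             game_lines.append(l)
--     return game_lines
-- ===== SOURCE B (Python) =====
-- from typing import List
--
-- def latest_game_lines(lines: List[str], user: str) -> List[str]:
--     target = f"{user} connected"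
--     idx = None
--     for i in range(len(lines) - 1, -1, -1):
--         if lines[i].strip() == target:
--             idx = i
--             break
--     return lines[:] if idx is None else lines[idx:]
-- ===== Notes on version B (the rewrite author's own statement) =====
-- stated objective: simpler
-- what changed: Instead of a forward pass that resets and appends to an accumulator list, B scans backward for the last line stripping to '<user> connected' and returns a single slice from that index (or a copy of all lines if none).
import Mathlib
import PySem

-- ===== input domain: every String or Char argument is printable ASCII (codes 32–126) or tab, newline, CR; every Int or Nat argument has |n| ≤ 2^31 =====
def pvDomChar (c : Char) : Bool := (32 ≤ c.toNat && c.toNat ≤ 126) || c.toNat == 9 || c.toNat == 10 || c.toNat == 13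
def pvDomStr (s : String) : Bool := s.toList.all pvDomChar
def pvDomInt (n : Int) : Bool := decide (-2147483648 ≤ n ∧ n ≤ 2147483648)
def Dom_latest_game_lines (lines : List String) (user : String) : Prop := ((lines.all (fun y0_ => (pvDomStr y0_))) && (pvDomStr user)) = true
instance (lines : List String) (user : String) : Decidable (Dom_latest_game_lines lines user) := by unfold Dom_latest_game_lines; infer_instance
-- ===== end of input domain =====

-- B replaces A's reset-and-append forward accumulator pass by a backward search for the
-- last "<user> connected" line followed by a slice; objective: simpler decomposition.


-- ===== PORT A =====
-- the for-loop with its game_lines accumulator, branch order as in A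
def pvLoopA (user : String) : List String → List String → List String
  | acc, [] => acc
  | acc, l :: ls =>
      if user ++ " connected" = PySem.Str.strip l then pvLoopA user [l] ls
      else pvLoopA user (acc ++ [l]) ls

def latest_game_lines (lines : List String) (user : String) : List String :=
  pvLoopA user [] lines

-- ===== PORT B =====
-- backward scan for the index of the last matching line (Python's range(len-1,-1,-1) loop)
def pvFindLast (user : String) : List String → Option Nat
  | [] => none
  | l :: ls =>
      match pvFindLast user ls with
      | some i => some (i + 1)
      | none => if PySem.Str.strip l = user ++ " connected" then some 0 else none

def latest_game_lines_alt (lines : List String) (user : String) : List String :=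
  match pvFindLast user lines with
  | none => lines                 -- lines[:]
  | some i => lines.drop i        -- lines[idx:], idx a valid nonnegative index: drop is exact

-- ===== PRECONDITION & SPEC =====
def Spec_latest_game_lines (lines : List String) (user : String) (out : List String) : Prop := out = latest_game_lines_alt lines user
instance (lines : List String) (user : String) (out : List String) : Decidable (Spec_latest_game_lines lines user out) := by unfold Spec_latest_game_lines; infer_instance

-- ===== CLAIM (what is proved, stated in full; the proofs are below) =====
def Claim_equal_latest_game_lines : Prop := ∀ (lines : List String) (user : String), Dom_latest_game_lines lines user → Spec_latest_game_lines lines user (latest_game_lines lines user)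

-- ===== LEMMAS AND PROOFS =====
theorem pvLoopA_eq (user : String) : ∀ (ls acc : List String),
    pvLoopA user acc ls =
      match pvFindLast user ls with
      | none => acc ++ ls
      | some i => ls.drop i := by
  intro ls
  induction ls with
  | nil => intro acc; simp [pvLoopA, pvFindLast]
  | cons l ls ih =>
    intro acc
    simp only [pvLoopA, pvFindLast]
    by_cases h : user ++ " connected" = PySem.Str.strip l
    · rw [if_pos h, if_pos h.symm, ih]
      cases hf : pvFindLast user ls with
      | none => simp
      | some i => simp
    · rw [if_neg h, if_neg (fun h' => h h'.symm), ih]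
      cases hf : pvFindLast user ls with
      | none => simp
      | some i => simp

-- ===== VERDICT (by name: the statement is the Claim_ definition above) =====
theorem latest_game_lines_spec : Claim_equal_latest_game_lines := by
  intro lines user _
  show latest_game_lines lines user = latest_game_lines_alt lines user
  rw [latest_game_lines, pvLoopA_eq, latest_game_lines_alt]
  cases pvFindLast user lines <;> simp
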